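-- pv_equiv track=rewrite | github.com/thekevinscott/github-data-file-fetcher | github_data_file_fetcher/graphql.py | _build_history_query
-- ===== SOURCE A (Python) =====
-- def _make_alias(index: int) -> str:
--     return f"r{index}"
--
-- def _escape_graphql_string(s: str) -> str:
--     """Escape a string for use inside GraphQL double-quoted strings."""
--     return s.replace("\\", "\\\\").replace('"', '\\"')
--
-- def _build_history_query(items: list[tuple[str, str, str, str]]) -> str:
--     """Build a batched GraphQL query for file commit history.
--
--     Each item is (owner, repo, ref, path).
--     Groups by (owner, repo) then by ref to minimize aliases.
--     """
--     # Group by (owner, repo) -> list of (index, ref, path)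
--     repo_groups: dict[tuple[str, str], list[tuple[int, str, str]]] = {}
--     for i, (owner, repo, ref, path) in enumerate(items):
--         key = (owner, repo)
--         if key not in repo_groups:
--             repo_groups[key] = []
--         repo_groups[key].append((i, ref, path))
--
--     parts = []
--     for repo_idx, ((owner, repo), file_list) in enumerate(repo_groups.items()):
--         # Group by ref within this repo
--         ref_groups: dict[str, list[tuple[int, str]]] = {}
--         for item_idx, ref, path in file_list:
--             if ref not in ref_groups:
--                 ref_groups[ref] = []
--             ref_groups[ref].append((item_idx, path))
--
--         ref_parts = []
--         for ref_idx, (ref, files) in enumerate(ref_groups.items()):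
--             file_parts = []
--             for file_idx, (item_idx, path) in enumerate(files):
--                 path_esc = _escape_graphql_string(path)
--                 file_parts.append(
--                     f'        f{file_idx}: history(first: 100, path: "{path_esc}") {{\n'
--                     f"          nodes {{ oid messageHeadline committedDate author {{ name }} }}\n"
--                     f"        }}"
--                 )
--             files_block = "\n".join(file_parts)
--             ref_esc = _escape_graphql_string(ref)
--             ref_parts.append(
--                 f'    ref{ref_idx}: object(expression: "{ref_esc}") {{\n'
--                 f"      ... on Commit {{\n"
--                 f"{files_block}\n"
--                 f"      }}\n"
--                 f"    }}"
--             )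
--
--         refs_block = "\n".join(ref_parts)
--         owner_esc = _escape_graphql_string(owner)
--         repo_esc = _escape_graphql_string(repo)
--         parts.append(
--             f'  {_make_alias(repo_idx)}: repository(owner: "{owner_esc}", name: "{repo_esc}") {{\n'
--             f"{refs_block}\n"
--             f"  }}"
--         )
--
--     return "query {\n" + "\n".join(parts) + "\n}"
-- ===== SOURCE B (Python) =====
-- def _escape_graphql_string(s: str) -> str:
--     return s.replace("\\", "\\\\").replace('"', '\\"')
--
--
-- def _file_block(file_idx: int, path: str) -> str:
--     path_esc = _escape_graphql_string(path)
--     return (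
--         f'        f{file_idx}: history(first: 100, path: "{path_esc}") {{\n'
--         f"          nodes {{ oid messageHeadline committedDate author {{ name }} }}\n"
--         f"        }}"
--     )
--
--
-- def _ref_block(ref_idx: int, ref: str, files_block: str) -> str:
--     ref_esc = _escape_graphql_string(ref)
--     return (
--         f'    ref{ref_idx}: object(expression: "{ref_esc}") {{\n'
--         f"      ... on Commit {{\n"
--         f"{files_block}\n"
--         f"      }}\n"
--         f"    }}"
--     )
--
--
-- def _repo_block(repo_idx: int, owner: str, repo: str, refs_block: str) -> str:
--     owner_esc = _escape_graphql_string(owner)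
--     repo_esc = _escape_graphql_string(repo)
--     return (
--         f'  r{repo_idx}: repository(owner: "{owner_esc}", name: "{repo_esc}") {{\n'
--         f"{refs_block}\n"
--         f"  }}"
--     )
--
--
-- def _build_history_query(items: list[tuple[str, str, str, str]]) -> str:
--     # Grouping = ordered dedup of keys + filtering; rendering is a separate pass.
--     repo_keys = list(dict.fromkeys((owner, repo) for owner, repo, _, _ in items))
--     parts = []
--     for repo_idx, (owner, repo) in enumerate(repo_keys):
--         sub = [(ref, path) for o, r, ref, path in items if (o, r) == (owner, repo)]
--         refs = list(dict.fromkeys(ref for ref, _ in sub))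
--         ref_parts = []
--         for ref_idx, ref in enumerate(refs):
--             file_parts = [
--                 _file_block(file_idx, path)
--                 for file_idx, path in enumerate(p for r, p in sub if r == ref)
--             ]
--             ref_parts.append(_ref_block(ref_idx, ref, "\n".join(file_parts)))
--         parts.append(_repo_block(repo_idx, owner, repo, "\n".join(ref_parts)))
--     return "query {\n" + "\n".join(parts) + "\n}"
-- ===== Notes on version B (the rewrite author's own statement) =====
-- stated objective: simpler
-- what changed: A interleaves building dict-of-lists groups (with item-index bookkeeping) and emission; B first computes the first-occurrence key lists via ordered dedup (dict.fromkeys) and recovers each group by filtering, then renders in a separate pass through small block helpers, carrying no indices at all.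
import Mathlib
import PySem

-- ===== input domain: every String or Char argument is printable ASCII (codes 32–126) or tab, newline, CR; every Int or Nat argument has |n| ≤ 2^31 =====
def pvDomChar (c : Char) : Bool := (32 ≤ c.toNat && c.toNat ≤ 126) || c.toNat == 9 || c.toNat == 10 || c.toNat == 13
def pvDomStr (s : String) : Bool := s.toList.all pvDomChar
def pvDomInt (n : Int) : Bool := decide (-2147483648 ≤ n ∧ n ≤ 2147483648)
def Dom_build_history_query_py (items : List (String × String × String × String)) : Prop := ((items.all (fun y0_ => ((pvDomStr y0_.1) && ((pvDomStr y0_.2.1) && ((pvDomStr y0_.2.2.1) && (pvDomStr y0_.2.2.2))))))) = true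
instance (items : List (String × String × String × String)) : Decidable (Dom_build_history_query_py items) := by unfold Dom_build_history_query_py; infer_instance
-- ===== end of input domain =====

-- B separates grouping (ordered dedup of keys + filtering) from rendering, instead of A's
-- interleaved dict-of-lists grouping with index bookkeeping; return value only, no speed claim.

-- ===== PORT A =====
-- shared module-level string helpers (both Python versions render byte-identical templates)
def pvEsc (s : String) : String :=
  PySem.Str.replace (PySem.Str.replace s "\\" "\\\\") "\"" "\\\""

def pvFileBlock (file_idx : Int) (path : String) : String :=
  "        f" ++ PySem.Int.toStr file_idx ++ ": history(first: 100, path: \"" ++ pvEsc path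
    ++ "\") {\n          nodes { oid messageHeadline committedDate author { name } }\n        }"

def pvRefBlock (ref_idx : Int) (ref : String) (files_block : String) : String :=
  "    ref" ++ PySem.Int.toStr ref_idx ++ ": object(expression: \"" ++ pvEsc ref
    ++ "\") {\n      ... on Commit {\n" ++ files_block ++ "\n      }\n    }"

def pvMakeAlias (index : Int) : String := "r" ++ PySem.Int.toStr index

-- A's first loop: repo_groups[(owner, repo)].append((i, ref, path))
def pvRepoGroupsA (items : List (String × String × String × String)) :
    PySem.Dict (String × String) (List (Int × String × String)) :=
  (PySem.List.enumerate items 0).foldl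
    (fun d p =>
      let key := (p.2.1, p.2.2.1)
      let d := if d.contains key then d else d.insert key []
      d.modify key [] (fun l => l ++ [(p.1, p.2.2.2.1, p.2.2.2.2)]))
    PySem.Dict.empty

-- A's inner loop: ref_groups[ref].append((item_idx, path))
def pvRefGroupsA (file_list : List (Int × String × String)) :
    PySem.Dict String (List (Int × String)) :=
  file_list.foldl
    (fun d t =>
      let d := if d.contains t.2.1 then d else d.insert t.2.1 []
      d.modify t.2.1 [] (fun l => l ++ [(t.1, t.2.2)]))
    PySem.Dict.empty

def build_history_query_py (items : List (String × String × String × String)) : String :=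
  let repo_groups := pvRepoGroupsA items
  let parts := (PySem.List.enumerate repo_groups.items 0).foldl
    (fun parts rp =>
      let ref_groups := pvRefGroupsA rp.2.2
      let ref_parts := (PySem.List.enumerate ref_groups.items 0).foldl
        (fun rps rq =>
          let file_parts := (PySem.List.enumerate rq.2.2 0).foldl
            (fun fps fq => fps ++ [pvFileBlock fq.1 fq.2.2]) []
          rps ++ [pvRefBlock rq.1 rq.2.1 (PySem.Str.join "\n" file_parts)]) []
      parts ++ ["  " ++ pvMakeAlias rp.1 ++ ": repository(owner: \"" ++ pvEsc rp.2.1.1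
        ++ "\", name: \"" ++ pvEsc rp.2.1.2 ++ "\") {\n"
        ++ PySem.Str.join "\n" ref_parts ++ "\n  }"]) []
  "query {\n" ++ PySem.Str.join "\n" parts ++ "\n}"

-- ===== PORT B =====
def pvRepoBlock (repo_idx : Int) (owner repo : String) (refs_block : String) : String :=
  "  r" ++ PySem.Int.toStr repo_idx ++ ": repository(owner: \"" ++ pvEsc owner
    ++ "\", name: \"" ++ pvEsc repo ++ "\") {\n" ++ refs_block ++ "\n  }"

def build_history_query_py_alt (items : List (String × String × String × String)) : String :=
  let repo_keys := PySem.List.dedup (items.map (fun t => (t.1, t.2.1)))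
  let parts := (PySem.List.enumerate repo_keys 0).map (fun rp =>
    let sub := (items.filter (fun t => (t.1, t.2.1) == rp.2)).map (fun t => (t.2.2.1, t.2.2.2))
    let refs := PySem.List.dedup (sub.map (fun q => q.1))
    let ref_parts := (PySem.List.enumerate refs 0).map (fun rq =>
      let file_parts :=
        (PySem.List.enumerate ((sub.filter (fun q => q.1 == rq.2)).map (fun q => q.2)) 0).map
          (fun fq => pvFileBlock fq.1 fq.2)
      pvRefBlock rq.1 rq.2 (PySem.Str.join "\n" file_parts))
    pvRepoBlock rp.1 rp.2.1 rp.2.2 (PySem.Str.join "\n" ref_parts))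
  "query {\n" ++ PySem.Str.join "\n" parts ++ "\n}"

-- ===== PRECONDITION & SPEC =====
def Spec_build_history_query_py (items : List (String × String × String × String)) (out : String) : Prop := out = build_history_query_py_alt items
instance (items : List (String × String × String × String)) (out : String) : Decidable (Spec_build_history_query_py items out) := by unfold Spec_build_history_query_py; infer_instance

-- ===== CLAIM (what is proved, stated in full; the proofs are below) =====
def Claim_equal_build_history_query_py : Prop := ∀ (items : List (String × String × String × String)), Dom_build_history_query_py items → Spec_build_history_query_py items (build_history_query_py items)

-- ===== LEMMAS AND PROOFS =====

-- the guarded "ensure key, then append" step of A equals the plain modify step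
lemma pv_guard_modify {κ β : Type} [BEq κ] [LawfulBEq κ]
    (d : PySem.Dict κ (List β)) (k : κ) (f : List β → List β) :
    (if d.contains k then d else d.insert k []).modify k [] f = d.modify k [] f := by
  have hm : ∀ (d' : PySem.Dict κ (List β)), d'.modify k [] f = d'.insert k (f (d'.getD k [])) :=
    fun d' => by simp [PySem.Dict.modify]
  by_cases h : d.contains k = true
  · simp [h]
  · simp only [Bool.not_eq_true] at h
    rw [if_neg (by simp [h]), hm, hm, PySem.Dict.getD_insert_self,
      PySem.Dict.insert_insert_self, PySem.Dict.getD_of_not_contains d [] h]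

-- items of a group-by-append fold: first-occurrence keys, each paired with its filtered values
lemma pv_group_items {κ β γ : Type} [BEq κ] [LawfulBEq κ]
    (l : List γ) (key : γ → κ) (val : γ → β) :
    (l.foldl (fun d p => d.modify (key p) [] (fun v => v ++ [val p])) PySem.Dict.empty).items
      = (PySem.List.dedup (l.map key)).map
          (fun k => (k, (l.filter (fun p => key p == k)).map val)) := by
  have hpair : (l.foldl (fun d p => d.modify (key p) [] (fun v => v ++ [val p]))
        (PySem.Dict.empty : PySem.Dict κ (List β)))
      = ((l.map (fun p => (key p, val p))).foldl
          (fun d q => d.modify q.1 [] (fun v => v ++ [q.2])) PySem.Dict.empty) := by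
    rw [List.foldl_map]
  have hnd : (l.foldl (fun d p => d.modify (key p) [] (fun v => v ++ [val p]))
      (PySem.Dict.empty : PySem.Dict κ (List β))).keys.Nodup := by
    exact PySem.Dict.nodup_keys_foldl_modify_key l key [] (fun d p v => v ++ [val p]) _ (by simp)
  rw [PySem.Dict.items_eq_map_keys _ hnd []]
  have hkeys : (l.foldl (fun d p => d.modify (key p) [] (fun v => v ++ [val p]))
      (PySem.Dict.empty : PySem.Dict κ (List β))).keys = PySem.List.dedup (l.map key) := by
    rw [PySem.Dict.keys_foldl_modify_key l key [] (fun d p v => v ++ [val p])]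
    simp [PySem.List.dedup_eq_ofList]
    rfl
  rw [hkeys]
  apply List.map_congr_left
  intro k _
  rw [hpair, PySem.Dict.getD_foldl_modify_append]
  simp [List.filter_map, Function.comp_def]

-- enumerate over a mapped list
lemma pv_enumerate_map {α β : Type} (g : α → β) (xs : List α) (s : Int) :
    PySem.List.enumerate (xs.map g) s = (PySem.List.enumerate xs s).map (fun p => (p.1, g p.2)) := by
  induction xs generalizing s with
  | nil => simp [PySem.List.enumerate_nil]
  | cons x xs ih => simp [PySem.List.enumerate_cons, ih]

-- filtering/projecting an enumerate through the payload only drops the indices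
lemma pv_enumerate_filter_snd {α β : Type} (q : α → Bool) (f : α → β) (xs : List α) (s : Int) :
    ((PySem.List.enumerate xs s).filter (fun p => q p.2)).map (fun p => f p.2)
      = (xs.filter q).map f := by
  induction xs generalizing s with
  | nil => simp [PySem.List.enumerate_nil]
  | cons x xs ih =>
    simp only [PySem.List.enumerate_cons, List.filter_cons]
    by_cases h : q x = true
    · simp [h, ih]
    · simp [h, ih]

-- mapping through the payload of an enumerate
lemma pv_map_snd_enumerate {α β : Type} (g : α → β) (xs : List α) (s : Int) :
    (PySem.List.enumerate xs s).map (fun p => g p.2) = xs.map g := by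
  induction xs generalizing s with
  | nil => simp [PySem.List.enumerate_nil]
  | cons x xs ih => simp [PySem.List.enumerate_cons, ih]

lemma pv_repoGroupsA_items (items : List (String × String × String × String)) :
    (pvRepoGroupsA items).items
      = (PySem.List.dedup ((PySem.List.enumerate items 0).map (fun p => (p.2.1, p.2.2.1)))).map
          (fun k => (k, ((PySem.List.enumerate items 0).filter (fun p => (p.2.1, p.2.2.1) == k)).map
              (fun p => (p.1, p.2.2.2.1, p.2.2.2.2)))) := by
  have h : pvRepoGroupsA items
      = (PySem.List.enumerate items 0).foldl
          (fun d p => d.modify (p.2.1, p.2.2.1) [] (fun v => v ++ [(p.1, p.2.2.2.1, p.2.2.2.2)]))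
          PySem.Dict.empty := by
    unfold pvRepoGroupsA
    congr 1
    funext d p
    exact pv_guard_modify d (p.2.1, p.2.2.1) _
  rw [h]
  exact pv_group_items (PySem.List.enumerate items 0)
    (fun p => (p.2.1, p.2.2.1)) (fun p => (p.1, p.2.2.2.1, p.2.2.2.2))

lemma pv_refGroupsA_items (fl : List (Int × String × String)) :
    (pvRefGroupsA fl).items
      = (PySem.List.dedup (fl.map (fun t => t.2.1))).map
          (fun r => (r, (fl.filter (fun t => t.2.1 == r)).map (fun t => (t.1, t.2.2)))) := by
  have h : pvRefGroupsA fl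
      = fl.foldl (fun d t => d.modify t.2.1 [] (fun v => v ++ [(t.1, t.2.2)])) PySem.Dict.empty := by
    unfold pvRefGroupsA
    congr 1
    funext d t
    exact pv_guard_modify d t.2.1 _
  rw [h]
  exact pv_group_items fl (fun t => t.2.1) (fun t => (t.1, t.2.2))

lemma pv_alias (i : Int) : "  " ++ pvMakeAlias i = "  r" ++ PySem.Int.toStr i := by
  unfold pvMakeAlias
  rw [← String.append_assoc]
  rfl

lemma pv_files_eq (files : List (Int × String)) :
    List.map (fun x => pvFileBlock x.1 x.2.2) (PySem.List.enumerate files)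
      = List.map (fun x => pvFileBlock x.1 x.2) (PySem.List.enumerate (files.map (fun t => t.2))) := by
  rw [pv_enumerate_map (fun t => t.2) files 0, List.map_map]
  rfl

lemma pv_paths (items : List (String × String × String × String)) (k : String × String) (r : String) :
    List.map (fun t => t.2)
      (List.map (fun t => (t.1, t.2.2))
        (List.filter (fun t => t.2.1 == r)
          (List.map (fun p => (p.1, p.2.2.2.1, p.2.2.2.2))
            (List.filter (fun p => (p.2.1, p.2.2.1) == k) (PySem.List.enumerate items)))))
      = List.map (fun q => q.2)
          (List.filter (fun q => q.1 == r)
            (List.map (fun t => (t.2.2.1, t.2.2.2)) (List.filter (fun t => (t.1, t.2.1) == k) items))) := by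
  simp only [List.filter_map, List.map_map, Function.comp_def, List.filter_filter]
  exact pv_enumerate_filter_snd (fun t => (t.2.2.1 == r) && ((t.1, t.2.1) == k)) (fun t => t.2.2.2) items 0

set_option maxHeartbeats 2000000 in
theorem pv_main : ∀ items, build_history_query_py items = build_history_query_py_alt items := by
  intro items
  unfold build_history_query_py build_history_query_py_alt
  simp only [PySem.List.foldl_append_singleton_eq_map, List.nil_append]
  rw [pv_repoGroupsA_items, pv_map_snd_enumerate (fun t => (t.1, t.2.1)) items 0,
    pv_enumerate_map, List.map_map]
  refine congrArg (fun l => "query {\n" ++ PySem.Str.join "\n" l ++ "\n}") ?_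
  apply List.map_congr_left
  rintro ⟨i, k⟩ -
  simp only [Function.comp_def]
  rw [pv_refGroupsA_items, pv_alias i]
  simp only [pvRepoBlock, List.map_map, Function.comp_def]
  rw [pv_enumerate_filter_snd (fun t => (t.1, t.2.1) == k) (fun t => t.2.2.1) items 0]
  rw [pv_enumerate_map, List.map_map]
  refine congrArg₂ (· ++ ·) (congrArg₂ (· ++ ·) rfl ?_) rfl
  refine congrArg (PySem.Str.join "\n") ?_
  apply List.map_congr_left
  rintro ⟨j, r⟩ -
  simp only [Function.comp_def]
  rw [pv_files_eq, pv_paths items k r]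

-- ===== VERDICT (by name: the statement is the Claim_ definition above) =====
theorem build_history_query_py_spec : Claim_equal_build_history_query_py := by
  intro items _
  exact pv_main items
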